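-- pv_equiv track=rewrite | github.com/nesterenkojul/friends-with-allergies | app.py | dict_values_to_list
-- ===== SOURCE A (Python) =====
-- def dict_values_to_list(dictionary):
--     key_map = {}
--     val_list = []
--     idx = 0
--     for key, val in dictionary.items():
--         val_list.extend(val)
--         key_map[key] = (idx, idx + len(val))
--         idx += len(val)
--     return key_map, val_list
-- ===== SOURCE B (Python) =====
-- def dict_values_to_list(dictionary):
--     values = list(dictionary.values())
--     bounds = [0]
--     for v in values:
--         bounds.append(bounds[-1] + len(v))
--     key_map = dict(zip(dictionary, zip(bounds, bounds[1:])))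
--     val_list = [x for v in values for x in v]
--     return key_map, val_list
-- ===== Notes on version B (the rewrite author's own statement) =====
-- stated objective: idiomatic
-- what changed: Replaces the single interleaved loop (running index, dict insert and extend per key) by a precomputed cumulative-boundary table zipped with the keys via dict(zip(...)), and a separate comprehension flatten of the values.
import Mathlib
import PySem

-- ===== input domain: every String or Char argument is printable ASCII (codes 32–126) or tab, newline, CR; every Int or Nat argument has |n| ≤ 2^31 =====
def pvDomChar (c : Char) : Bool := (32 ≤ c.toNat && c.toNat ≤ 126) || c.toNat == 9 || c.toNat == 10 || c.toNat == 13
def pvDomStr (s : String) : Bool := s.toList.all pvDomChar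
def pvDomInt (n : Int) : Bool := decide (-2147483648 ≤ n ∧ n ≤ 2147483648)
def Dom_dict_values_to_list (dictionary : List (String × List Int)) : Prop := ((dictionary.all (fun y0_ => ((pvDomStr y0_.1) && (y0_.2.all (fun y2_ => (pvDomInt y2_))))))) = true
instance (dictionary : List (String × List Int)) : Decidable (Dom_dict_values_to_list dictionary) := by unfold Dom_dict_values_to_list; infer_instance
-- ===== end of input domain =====

-- B replaces A's interleaved index-accumulator loop by a precomputed cumulative-boundary
-- table zipped with the keys plus a separate flatten (idiomatic decomposition, same cost).


-- ===== PORT A =====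
-- key_map as PySem.Dict; the loop carries (key_map, val_list, idx) exactly as A does.
def dict_values_to_list (dictionary : List (String × List Int)) : (List (String × Int × Int)) × List Int :=
  let s := dictionary.foldl
    (fun (s : PySem.Dict String (Int × Int) × List Int × Int) kv =>
      (s.1.insert kv.1 (s.2.2, s.2.2 + (kv.2.length : Int)),
       s.2.1 ++ kv.2,
       s.2.2 + (kv.2.length : Int)))
    (PySem.Dict.empty, [], 0)
  (s.1.items, s.2.1)

-- ===== PORT B =====
-- bounds loop appends last+len(v); key_map = dict(zip(keys, zip(bounds, bounds[1:]))); flatten separately.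
def dict_values_to_list_alt (dictionary : List (String × List Int)) : (List (String × Int × Int)) × List Int :=
  let values := dictionary.map (·.2)
  let bounds := values.foldl (fun bs v => bs ++ [bs.getLast! + (v.length : Int)]) [(0 : Int)]
  let key_map := PySem.Dict.ofList ((dictionary.map (·.1)).zip (bounds.zip bounds.tail))
  (key_map.items, values.flatMap (fun v => v))

-- ===== PRECONDITION & SPEC =====
def Spec_dict_values_to_list (dictionary : List (String × List Int)) (out : (List (String × Int × Int)) × List Int) : Prop := out = dict_values_to_list_alt dictionary
instance (dictionary : List (String × List Int)) (out : (List (String × Int × Int)) × List Int) : Decidable (Spec_dict_values_to_list dictionary out) := by unfold Spec_dict_values_to_list; infer_instance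

-- ===== CLAIM (what is proved, stated in full; the proofs are below) =====
def Claim_equal_dict_values_to_list : Prop := ∀ (dictionary : List (String × List Int)), Dom_dict_values_to_list dictionary → Spec_dict_values_to_list dictionary (dict_values_to_list dictionary)

-- ===== LEMMAS AND PROOFS =====

-- the boundary list B's loop builds, as a structural scan
def pvScan (i : Int) : List (List Int) → List Int
  | [] => [i]
  | v :: vs => i :: pvScan (i + v.length) vs

-- the (start, end) pairs both programs associate with consecutive values, starting at offset i
def pvPairs (i : Int) : List (List Int) → List (Int × Int)
  | [] => []
  | v :: vs => (i, i + v.length) :: pvPairs (i + v.length) vs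

theorem bounds_loop_eq (vs : List (List Int)) :
    ∀ (bs : List Int), bs ≠ [] →
      vs.foldl (fun bs v => bs ++ [bs.getLast! + (v.length : Int)]) bs
        = bs.dropLast ++ pvScan (bs.getLast!) vs := by
  induction vs with
  | nil =>
    intro bs h
    have hgl : bs.getLast! = bs.getLast h := by
      rw [List.getLast!_eq_getLast?_getD, List.getLast?_eq_some_getLast h]; rfl
    simp only [List.foldl_nil, pvScan, hgl]
    exact (List.dropLast_concat_getLast h).symm
  | cons v vs ih =>
    intro bs h
    have hgl : bs.getLast! = bs.getLast h := by
      rw [List.getLast!_eq_getLast?_getD, List.getLast?_eq_some_getLast h]; rfl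
    have hnn : bs ++ [bs.getLast! + (v.length : Int)] ≠ [] := by simp
    rw [List.foldl_cons, ih _ hnn]
    have hl : (bs ++ [bs.getLast! + (v.length : Int)]).getLast! = bs.getLast! + (v.length : Int) := by
      simp [List.getLast!_eq_getLast?_getD]
    have hd : (bs ++ [bs.getLast! + (v.length : Int)]).dropLast = bs := by
      simp
    rw [hl, hd, pvScan, hgl]
    calc bs ++ pvScan (bs.getLast h + (v.length : Int)) vs
        = (bs.dropLast ++ [bs.getLast h]) ++ pvScan (bs.getLast h + (v.length : Int)) vs := by
          rw [List.dropLast_concat_getLast h]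
      _ = bs.dropLast ++ (bs.getLast h :: pvScan (bs.getLast h + (v.length : Int)) vs) := by
          simp

theorem zip_scan_tail (vs : List (List Int)) :
    ∀ (i : Int), (pvScan i vs).zip (pvScan i vs).tail = pvPairs i vs := by
  induction vs with
  | nil => intro i; simp [pvScan, pvPairs]
  | cons v vs ih =>
    intro i
    cases vs with
    | nil => simp [pvScan, pvPairs]
    | cons w ws =>
      have := ih (i + v.length)
      simp only [pvScan, pvPairs, List.tail_cons, List.zip_cons_cons, List.cons.injEq] at this ⊢
      exact ⟨trivial, this⟩

theorem a_loop_eq (l : List (String × List Int)) :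
    ∀ (d : PySem.Dict String (Int × Int)) (vl : List Int) (idx : Int),
      l.foldl
        (fun (s : PySem.Dict String (Int × Int) × List Int × Int) kv =>
          (s.1.insert kv.1 (s.2.2, s.2.2 + (kv.2.length : Int)),
           s.2.1 ++ kv.2,
           s.2.2 + (kv.2.length : Int)))
        (d, vl, idx)
      = ( ((l.map (·.1)).zip (pvPairs idx (l.map (·.2)))).foldl (fun d p => d.insert p.1 p.2) d,
          vl ++ l.flatMap (·.2),
          idx + ((l.map (fun kv => (kv.2.length : Int))).sum) ) := by
  induction l with
  | nil => intro d vl idx; simp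
  | cons kv l ih =>
    intro d vl idx
    simp only [List.foldl_cons, List.map_cons, pvPairs, List.zip_cons_cons, List.flatMap_cons,
      List.sum_cons]
    rw [ih]
    simp only [Prod.mk.injEq]
    refine ⟨trivial, by simp, by ring⟩

-- ===== VERDICT (by name: the statement is the Claim_ definition above) =====
theorem dict_values_to_list_spec : Claim_equal_dict_values_to_list := by
  intro dictionary _
  unfold Spec_dict_values_to_list
  simp only [dict_values_to_list, dict_values_to_list_alt]
  rw [a_loop_eq]
  rw [bounds_loop_eq _ [(0 : Int)] (by simp)]
  rw [show ([(0 : Int)].dropLast ++ pvScan ([(0 : Int)].getLast!) (dictionary.map (·.2)))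
        = pvScan 0 (dictionary.map (·.2)) from rfl]
  rw [zip_scan_tail]
  simp only [Prod.mk.injEq]
  refine ⟨rfl, ?_⟩
  simp [List.flatMap_map]
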